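-- pv_equiv track=rewrite | github.com/olivermop/bioinformatics-portfolio | exercises/estimate_ktl.py | estimate_t
-- ===== SOURCE A (Python) =====
-- import collections
--
-- def estimate_t(genome, k, L):
--     repetition_counts = []
--
--     # Slide windows of length L
--     for i in range(len(genome) - L + 1):
--         window = genome[i:i + L]
--         frequency_map = collections.defaultdict(int)
--
--         # Count k-mer repeats within the window
--         for j in range(len(window) - k + 1):
--             k_mer = window[j:j + k]
--             frequency_map[k_mer] += 1
--
--         # Get the maximum number of repeats of any k-mer in the window
--         max_repetition = max(frequency_map.values(), default=0)
--         repetition_counts.append(max_repetition)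
--
--     # Use the average of the maximum repeats as the estimate for t
--     if repetition_counts:
--         return sum(repetition_counts) // len(repetition_counts)
--     else:
--         return None  # No windows to estimate t
-- ===== SOURCE B (Python) =====
-- def estimate_t(genome, k, L):
--     n = len(genome)
--     W = n - L + 1          # number of sliding windows
--     if W <= 0:
--         return None        # no windows to estimate t
--     total = 0
--     for i in range(W):
--         w = genome[i:i + L]
--         kms = sorted(w[j:j + k] for j in range(len(w) - k + 1))
--         # equal k-mers are adjacent after sorting: the longest run is the max repeat count
--         best = 0
--         run = 0
--         prev = None
--         for x in kms:
--             run = run + 1 if x == prev else 1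
--             if run > best:
--                 best = run
--             prev = x
--         total += best
--     return total // W
-- ===== Notes on version B (the rewrite author's own statement) =====
-- stated objective: alternative
-- what changed: Per window, A's defaultdict frequency map with max over its values is replaced by sorting the window's k-mer list and scanning for the longest run of equal neighbours, and A's list of per-window maxima by a running total divided by the precomputed window count.
import Mathlib
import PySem

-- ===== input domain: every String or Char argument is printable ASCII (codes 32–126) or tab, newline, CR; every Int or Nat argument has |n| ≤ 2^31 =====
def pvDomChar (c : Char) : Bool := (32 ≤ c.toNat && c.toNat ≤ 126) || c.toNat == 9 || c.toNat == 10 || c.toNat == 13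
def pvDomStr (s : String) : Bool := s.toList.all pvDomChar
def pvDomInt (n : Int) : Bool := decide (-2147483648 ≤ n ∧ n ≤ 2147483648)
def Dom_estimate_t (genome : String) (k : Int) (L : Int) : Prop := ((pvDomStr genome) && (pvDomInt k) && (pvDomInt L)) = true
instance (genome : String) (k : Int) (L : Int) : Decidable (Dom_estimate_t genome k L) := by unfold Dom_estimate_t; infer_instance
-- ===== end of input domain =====

-- B sorts each window's k-mer list and takes the longest run of equal neighbours instead of
-- A's defaultdict frequency map with max over its values, and keeps a running total instead
-- of A's list of per-window maxima; return values agree on all inputs.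

-- ===== PORT A =====
def estimate_t (genome : String) (k : Int) (L : Int) : Option Int :=
  let g := genome.toList
  let reps : List Int := (PySem.List.pyRange 0 ((g.length : Int) - L + 1) 1).foldl
    (fun acc i =>
      let window := PySem.List.slice g (some i) (some (i + L))
      let fm : PySem.Dict (List Char) Int :=
        (PySem.List.pyRange 0 ((window.length : Int) - k + 1) 1).foldl
          (fun d j => d.modify (PySem.List.slice window (some j) (some (j + k))) 0 (· + 1))
          PySem.Dict.empty
      acc ++ [PySem.List.maxD fm.values (fun v => v) 0]) []
  if reps ≠ [] then some (PySem.Int.floordiv reps.sum (reps.length : Int)) else none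

-- ===== PORT B =====
def estimate_t_alt (genome : String) (k : Int) (L : Int) : Option Int :=
  let g := genome.toList
  let W : Int := (g.length : Int) - L + 1
  if W ≤ 0 then none
  else
    let total : Int := (PySem.List.pyRange 0 W 1).foldl
      (fun total i =>
        let w := PySem.List.slice g (some i) (some (i + L))
        let kms := PySem.List.sorted
          ((PySem.List.pyRange 0 ((w.length : Int) - k + 1) 1).map
            (fun j => PySem.List.slice w (some j) (some (j + k)))) (fun x => x)
        let st := kms.foldl
          (fun (st : Int × Int × Option (List Char)) x =>
            let run : Int := if some x == st.2.2 then st.2.1 + 1 else 1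
            let best : Int := if run > st.1 then run else st.1
            (best, run, some x))
          (0, 0, none)
        total + st.1) 0
    some (PySem.Int.floordiv total W)

-- ===== PRECONDITION & SPEC =====
def Spec_estimate_t (genome : String) (k : Int) (L : Int) (out : Option Int) : Prop := out = estimate_t_alt genome k L
instance (genome : String) (k : Int) (L : Int) (out : Option Int) : Decidable (Spec_estimate_t genome k L out) := by unfold Spec_estimate_t; infer_instance

-- ===== CLAIM (what is proved, stated in full; the proofs are below) =====
def Claim_equal_estimate_t : Prop := ∀ (genome : String) (k : Int) (L : Int), Dom_estimate_t genome k L → Spec_estimate_t genome k L (estimate_t genome k L)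

-- ===== LEMMAS AND PROOFS =====

-- B's loop body, named for the proofs (definitionally the lambda in the port of B)
def runStep (st : Int × Int × Option (List Char)) (x : List Char) : Int × Int × Option (List Char) :=
  let run := if some x == st.2.2 then st.2.1 + 1 else 1
  let best := if run > st.1 then run else st.1
  (best, run, some x)

lemma runStep_eq (st : Int × Int × Option (List Char)) (x : List Char) :
    runStep st x = (max st.1 (if some x == st.2.2 then st.2.1 + 1 else 1),
                    (if some x == st.2.2 then st.2.1 + 1 else 1), some x) := by
  simp only [runStep]
  split <;> (refine Prod.ext ?_ rfl) <;> simp <;> omega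

-- L0: the best component from (b,r,p) is max b of best from (0,r,p)
lemma best_extract (s : List (List Char)) : ∀ (b r : Int) (p : Option (List Char)),
    0 ≤ b → 0 ≤ r →
    (s.foldl runStep (b, r, p)).1 = max b (s.foldl runStep (0, r, p)).1 := by
  induction s with
  | nil => intro b r p hb _; simp; omega
  | cons x t ih =>
    intro b r p hb hr
    simp only [List.foldl_cons, runStep_eq]
    by_cases hx : (some x == p) = true <;>
      simp only [hx, if_pos, if_neg, Bool.false_eq_true, if_false, if_true] <;>
      rw [ih _ _ _ (by omega) (by omega), ih (max 0 _) _ _ (by omega) (by omega)] <;>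
      omega

-- L1: a run of c copies of a continues the current run
lemma fold_replicate (c : Nat) : ∀ (b r : Int) (a : List Char), r ≤ b → 0 ≤ r →
    (List.foldl runStep (b, r, some a) (List.replicate c a)) = (max b (r + c), r + c, some a) := by
  induction c with
  | zero => intro b r a h _; simp; omega
  | succ m ih =>
    intro b r a h hr
    simp only [List.replicate_succ, List.foldl_cons, runStep_eq]
    simp only [BEq.rfl, if_true]
    rw [ih _ _ _ (by omega) (by omega)]
    refine Prod.ext ?_ (Prod.ext ?_ rfl) <;> simp <;> push_cast <;> omega

def runBest (s : List (List Char)) : Int := (s.foldl runStep (0, 0, none)).1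

-- L2: entering a list whose head differs from prev restarts the run
lemma fold_fresh (u : List (List Char)) (b r : Int) (p : Option (List Char))
    (hb : 0 ≤ b) (hr : 0 ≤ r)
    (hhead : ∀ x, u.head? = some x → (some x == p) = false) :
    (u.foldl runStep (b, r, p)).1 = max b (runBest u) := by
  cases u with
  | nil => simp [runBest]; omega
  | cons x t =>
    have hx := hhead x rfl
    simp only [List.foldl_cons, runStep_eq, hx, Bool.false_eq_true, if_false, runBest]
    simp only [show (some x == (none : Option (List Char))) = false from rfl,
      Bool.false_eq_true, if_false]
    rw [best_extract t (max b 1) 1 (some x) (by omega) (by omega)]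
    rw [best_extract t (max 0 1) 1 (some x) (by omega) (by omega)]
    omega

lemma runBest_sorted : ∀ (n : Nat) (s : List (List Char)), s.length ≤ n →
    List.Pairwise (· ≤ ·) s →
    (0 ≤ runBest s) ∧ (∀ x ∈ s, (s.count x : Int) ≤ runBest s) ∧
    (s ≠ [] → ∃ x ∈ s, runBest s = (s.count x : Int)) := by
  intro n
  induction n with
  | zero =>
    intro s hlen _
    have : s = [] := List.eq_nil_of_length_eq_zero (by omega)
    subst this
    refine ⟨le_refl _, by simp, by simp⟩
  | succ m ih =>
    intro s hlen hs
    cases hcs : s with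
    | nil => refine ⟨le_refl _, by simp, by simp⟩
    | cons a t =>
      subst hcs
      set tw := (a :: t).takeWhile (fun y => y == a) with htw
      set dw := (a :: t).dropWhile (fun y => y == a) with hdw
      have hsplit : a :: t = tw ++ dw := (List.takeWhile_append_dropWhile).symm
      have htwrep : tw = List.replicate tw.length a := by
        apply List.eq_replicate_length.mpr
        intro y hy
        have := List.mem_takeWhile_imp hy
        simpa using this
      have htwlen : 1 ≤ tw.length := by
        rw [htw, List.takeWhile_cons]
        simp
      have hdwpw : List.Pairwise (· ≤ ·) dw := hs.sublist (hsplit ▸ List.sublist_append_right tw dw)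
      have hadw : a ∉ dw := by
        intro hmem
        cases hcd : dw with
        | nil => rw [hcd] at hmem; simp at hmem
        | cons h u =>
          have hhne : ¬ (h == a) = true := by
            have := List.head?_dropWhile_not (fun y => y == a) (a :: t)
            rw [← hdw, hcd] at this
            simpa using this
          have hha : h ≠ a := by simpa using hhne
          rw [hcd] at hmem
          rcases List.mem_cons.mp hmem with h1 | h2
          · exact hha h1.symm
          · -- a ∈ u, h ≤ a from pairwise dw, a ≤ h from pairwise s
            have h1 : h ≤ a := by
              rw [hcd] at hdwpw
              exact (List.pairwise_cons.mp hdwpw).1 a h2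
            have h2' : a ≤ h := by
              have hh : h ∈ t := by
                have : h ∈ dw := by rw [hcd]; exact List.mem_cons_self
                have : h ∈ a :: t := hsplit ▸ List.mem_append_right tw this
                rcases List.mem_cons.mp this with e | e
                · exact absurd e hha
                · exact e
              exact (List.pairwise_cons.mp hs).1 h hh
            exact hha (le_antisymm h1 h2')
      have hcount_a : (a :: t).count a = tw.length := by
        rw [hsplit, List.count_append]
        rw [List.count_eq_zero.mpr hadw]
        conv_lhs => rw [htwrep]
        simp
      have hN : runBest (a :: t) = max (tw.length : Int) (runBest dw) := by
        rw [show (a :: t) = tw ++ dw from hsplit]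
        rw [runBest, List.foldl_append]
        conv_lhs => rw [htwrep]
        cases hc : tw.length with
        | zero => omega
        | succ c =>
          rw [List.replicate_succ, List.foldl_cons]
          have hstep : runStep (0, 0, none) a = (1, 1, some a) := by
            rw [runStep_eq]; rfl
          rw [hstep, fold_replicate c 1 1 a (le_refl _) (by omega)]
          rw [fold_fresh dw _ _ _ (by omega) (by push_cast; omega)]
          · push_cast; omega
          · intro x hx
            cases hcd : dw with
            | nil => rw [hcd] at hx; simp at hx
            | cons h u =>
              rw [hcd] at hx
              simp at hx
              subst hx
              have h2 := List.head?_dropWhile_not (fun y => y == a) (a :: t)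
              rw [← hdw, hcd] at h2
              simpa using h2
      have hdwlen : dw.length ≤ m := by
        have hlen2 : (tw ++ dw).length = (a :: t).length := by rw [← hsplit]
        rw [List.length_append] at hlen2
        simp only [List.length_cons] at hlen2 hlen
        omega
      obtain ⟨ihpos, ihub, ihex⟩ := ih dw hdwlen hdwpw
      refine ⟨by omega, ?_, ?_⟩
      · intro x hx
        by_cases hxa : x = a
        · subst hxa
          rw [hcount_a, hN]; omega
        · have hxdw : x ∈ dw := by
            rcases (List.mem_append.mp (hsplit ▸ hx)) with h1 | h1
            · exfalso; apply hxa
              rw [htwrep] at h1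
              exact List.eq_of_mem_replicate h1
            · exact h1
          have hcnt : (a :: t).count x = dw.count x := by
            rw [hsplit, List.count_append]
            have : tw.count x = 0 := by
              rw [htwrep, List.count_replicate]
              simp [beq_iff_eq, Ne.symm hxa]
            omega
          rw [hcnt, hN]
          have := ihub x hxdw
          omega
      · intro _
        rw [hN]
        by_cases hle : runBest dw ≤ (tw.length : Int)
        · refine ⟨a, List.mem_cons_self, ?_⟩
          rw [hcount_a]; omega
        · have hdwne : dw ≠ [] := by
            intro e
            exact hle (by rw [e]; simp [runBest])
          obtain ⟨x, hx, he⟩ := ihex hdwne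
          refine ⟨x, hsplit ▸ List.mem_append_right tw hx, ?_⟩
          have hxa : x ≠ a := fun e => hadw (e ▸ hx)
          have hcnt : (a :: t).count x = dw.count x := by
            rw [hsplit, List.count_append]
            have : tw.count x = 0 := by
              rw [htwrep, List.count_replicate]
              simp [beq_iff_eq, Ne.symm hxa]
            omega
          rw [hcnt]; omega

lemma sorted_inst (l : List (List Char)) :
  (@PySem.List.sorted (List Char) (List Char) List.instLT (fun a b => a.decidableLT b) l (fun x => x) false)
  = @PySem.List.sorted (List Char) (List Char) List.instLinearOrder.toLT LinearOrder.toDecidableLT l (fun x => x) false := by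
  congr 1

lemma window_max_eq' (l : List (List Char)) :
    PySem.List.maxD (PySem.Dict.counter l).values (fun v => v) 0
      = runBest (PySem.List.sorted l (fun x => x)) := by
  cases hl : l with
  | nil => rfl
  | cons a t =>
  rw [← hl]
  have hlne : l ≠ [] := by rw [hl]; simp
  set s := PySem.List.sorted l (fun x => x) with hsdef
  have hperm : s.Perm l := PySem.List.sorted_perm l (fun x => x) false
  have hsne : s ≠ [] := by
    intro e
    exact hlne (List.Perm.eq_nil (e ▸ hperm.symm))
  obtain ⟨hpos, hub, hex⟩ := runBest_sorted s.length s (le_refl _)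
    (by rw [hsdef, sorted_inst]; exact PySem.List.sorted_pairwise l (fun x => x))
  obtain ⟨y, hy, hey⟩ := hex hsne
  have hvals : (PySem.Dict.counter l).values
      = List.map (fun k => (l.count k : Int)) (PySem.Set.ofList l) := by
    show List.map Prod.snd (PySem.Dict.counter l).items = _
    rw [PySem.Dict.items_counter, List.map_map]
    rfl
  have hmemval : ∀ v, v ∈ (PySem.Dict.counter l).values ↔ ∃ x ∈ l, (l.count x : Int) = v := by
    intro v
    rw [hvals, List.mem_map]
    constructor
    · rintro ⟨x, hx, he⟩
      exact ⟨x, (PySem.Set.mem_ofList l x).mp hx, he⟩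
    · rintro ⟨x, hx, he⟩
      exact ⟨x, (PySem.Set.mem_ofList l x).mpr hx, he⟩
  -- runBest s is one of the values
  have hrbval : runBest s ∈ (PySem.Dict.counter l).values := by
    rw [hmemval]
    refine ⟨y, hperm.subset hy, ?_⟩
    rw [← hperm.count_eq, hey]
  -- and bounds all values
  have hbound : ∀ v ∈ (PySem.Dict.counter l).values, v ≤ runBest s := by
    intro v hv
    obtain ⟨x, hx, he⟩ := (hmemval v).mp hv
    rw [← he, ← hperm.count_eq]
    exact hub x (hperm.mem_iff.mpr hx)
  -- maxD = runBest s by antisymmetry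
  cases hm : PySem.List.max? (PySem.Dict.counter l).values (fun v => v) with
  | none =>
    exfalso
    have := (PySem.List.max?_eq_none_iff _ _).mp hm
    rw [this] at hrbval
    simp at hrbval
  | some m =>
    have h1 : m ≤ runBest s := hbound m (PySem.List.max?_mem hm)
    have h2 : runBest s ≤ m := PySem.List.max?_isMax hm _ hrbval
    simp [PySem.List.maxD, hm]
    omega

lemma pyRange_nil (W : Int) (h : W ≤ 0) : PySem.List.pyRange 0 W 1 = [] := by
  simp [PySem.List.pyRange]; intro h2; omega

lemma pyRange_len (W : Int) : ((PySem.List.pyRange 0 W 1).length : Int) = max W 0 := by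
  unfold PySem.List.pyRange
  split
  · omega
  · simp only [List.length_map, List.length_range]
    split
    · split <;> omega
    · omega

-- per-window: A's max of the frequency map's values = B's longest run in the sorted k-mer list
lemma body_eq (w : List Char) (k : Int) :
    PySem.List.maxD
      ((PySem.List.pyRange 0 ((w.length : Int) - k + 1) 1).foldl
        (fun d j => d.modify (PySem.List.slice w (some j) (some (j + k))) 0 (· + 1))
        (PySem.Dict.empty : PySem.Dict (List Char) Int)).values (fun v => v) 0
    = ((PySem.List.sorted
          ((PySem.List.pyRange 0 ((w.length : Int) - k + 1) 1).map
            (fun j => PySem.List.slice w (some j) (some (j + k)))) (fun x => x)).foldl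
        runStep (0, 0, none)).1 := by
  have h : (PySem.List.pyRange 0 ((w.length : Int) - k + 1) 1).foldl
      (fun d j => d.modify (PySem.List.slice w (some j) (some (j + k))) 0 (· + 1))
      (PySem.Dict.empty : PySem.Dict (List Char) Int)
      = PySem.Dict.counter ((PySem.List.pyRange 0 ((w.length : Int) - k + 1) 1).map
          (fun j => PySem.List.slice w (some j) (some (j + k)))) := by
    rw [PySem.Dict.counter_eq_foldl, List.foldl_map]
  rw [h, window_max_eq']
  rfl

theorem estimate_t_eq (genome : String) (k : Int) (L : Int) :
    estimate_t genome k L = estimate_t_alt genome k L := by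
  unfold estimate_t estimate_t_alt
  simp only []
  set g := genome.toList with hg
  set W : Int := ((g.length : Int) - L + 1) with hWdef
  by_cases hW : W ≤ 0
  · rw [pyRange_nil W hW]
    simp [hW]
  · rw [if_neg hW]
    have hlen := pyRange_len W
    have hne : PySem.List.pyRange 0 W 1 ≠ [] := by
      intro hnil; rw [hnil] at hlen; simp at hlen; omega
    rw [PySem.List.foldl_append_singleton_eq_map
      (fun i => PySem.List.maxD
        ((PySem.List.pyRange 0 (((PySem.List.slice g (some i) (some (i + L))).length : Int) - k + 1) 1).foldl
          (fun d j => d.modify (PySem.List.slice (PySem.List.slice g (some i) (some (i + L))) (some j) (some (j + k))) 0 (· + 1))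
          (PySem.Dict.empty : PySem.Dict (List Char) Int)).values (fun v => v) 0)]
    rw [PySem.List.foldl_add]
    simp only [List.nil_append, zero_add]
    simp only [show (fun (st : Int × Int × Option (List Char)) (x : List Char) =>
        let run : Int := if some x == st.2.2 then st.2.1 + 1 else 1
        let best : Int := if run > st.1 then run else st.1
        (best, run, some x)) = runStep from rfl]
    simp only [body_eq]
    rw [if_pos (by simpa using hne)]
    congr 1
    rw [List.length_map]
    congr 1
    omega

-- ===== VERDICT (by name: the statement is the Claim_ definition above) =====
theorem estimate_t_spec : Claim_equal_estimate_t := by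
  intro genome k L _
  exact estimate_t_eq genome k L
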